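-- pv_equiv track=rewrite | github.com/bobbychansfu/sfu_judge_problems | 1052/submissions/shuffling.py | findInterleavings
-- ===== SOURCE A (Python) =====
-- def findInterleavings(X, Y, interleavings, curr=''):
--     # insert `curr` into the set if the end of both strings is reached
--     if not X and not Y:
--         interleavings.add(curr)
--         return
--
--     # if the string `X` is not empty, append its first character in the
--     # result and recur for the remaining substring
--
--     if X:
--         findInterleavings(X[1:], Y, interleavings, curr + X[0])
--
--     # if the string `Y` is not empty, append its first character in the
--     # result and recur for the remaining substring
--
--     if Y:
--         findInterleavings(X, Y[1:], interleavings, curr + Y[0])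
--
--     return interleavings
-- ===== SOURCE B (Python) =====
-- def findInterleavings(X, Y, interleavings, curr=''):
--     # bottom-up DP over suffix pairs instead of recursive DFS
--     if not X and not Y:
--         interleavings.add(curr)
--         return
--     n, m = len(X), len(Y)
--     prev = None
--     for i in range(n, -1, -1):
--         row = [None] * (m + 1)
--         for j in range(m, -1, -1):
--             opts = []
--             if i < n:
--                 opts += [X[i] + t for t in prev[j]]
--             if j < m:
--                 opts += [Y[j] + t for t in row[j + 1]]
--             row[j] = opts if opts else ['']
--         prev = row
--     for t in prev[0]:
--         interleavings.add(curr + t)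
--     return interleavings
-- ===== Notes on version B (the rewrite author's own statement) =====
-- stated objective: alternative
-- what changed: Replaces A's character-by-character recursive DFS (one recursion per emitted string prefix) with a bottom-up dynamic-programming table over suffix pairs (i,j) that builds the list of interleavings of X[i:] and Y[j:] row by row with two nested loops, then adds curr+t for each table[0][0] entry.
-- outside the precondition, e.g. on findInterleavings('', '', set(), 'x'): A returns None, B returns None
import Mathlib
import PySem

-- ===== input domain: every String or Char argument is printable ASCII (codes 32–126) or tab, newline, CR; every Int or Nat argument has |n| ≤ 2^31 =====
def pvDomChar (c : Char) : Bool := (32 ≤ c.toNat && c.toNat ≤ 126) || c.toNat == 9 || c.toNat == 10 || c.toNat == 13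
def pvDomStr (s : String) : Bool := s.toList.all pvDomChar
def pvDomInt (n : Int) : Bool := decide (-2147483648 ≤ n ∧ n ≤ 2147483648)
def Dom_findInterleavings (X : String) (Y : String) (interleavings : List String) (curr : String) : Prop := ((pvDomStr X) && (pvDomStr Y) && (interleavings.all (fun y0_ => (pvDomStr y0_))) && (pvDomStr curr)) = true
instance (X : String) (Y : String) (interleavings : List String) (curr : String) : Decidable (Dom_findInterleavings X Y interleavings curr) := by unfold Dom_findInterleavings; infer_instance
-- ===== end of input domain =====

-- B replaces A's recursive DFS by a bottom-up DP table over suffix pairs (alternative algorithm,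
-- same cost class). Both Pythons mutate the passed-in set identically; equivalence here is about
-- the returned value, with the set argument modelled as PySem.Set.ofList interleavings.

-- ===== PORT A =====
-- A's recursion, case-split on the two emptiness tests (branch order preserved: X-branch first,
-- then Y-branch threading the mutated set).
def goA : List Char → List Char → PySem.Set String → List Char → PySem.Set String
  | [], [], s, curr => PySem.Set.add s (String.ofList curr)
  | [], d :: ys, s, curr => goA [] ys s (curr ++ [d])
  | c :: xs, [], s, curr => goA xs [] s (curr ++ [c])
  | c :: xs, d :: ys, s, curr =>
      goA (c :: xs) ys (goA xs (d :: ys) s (curr ++ [c])) (curr ++ [d])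
termination_by X Y => X.length + Y.length
decreasing_by all_goals simp

def findInterleavings (X : String) (Y : String) (interleavings : List String) (curr : String) : List String :=
  goA X.toList Y.toList (PySem.Set.ofList interleavings) curr.toList

-- ===== PORT B =====
-- row for i = n (no X character available): row[j] from row[j+1], base cell [''].
def rowBase : List Char → List (List (List Char))
  | [] => [[[]]]
  | d :: ys =>
      let rest := rowBase ys
      let opts := (rest.headD []).map (fun t => d :: t)
      (if opts = [] then [[]] else opts) :: rest

-- row for i < n with X[i] = c: row[j] from prev[j] and row[j+1] (python's inner j loop).
def rowStep (c : Char) : List Char → List (List (List Char)) → List (List (List Char))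
  | [], prev =>
      let opts := (prev.headD []).map (fun t => c :: t)
      [if opts = [] then [[]] else opts]
  | d :: ys, prev =>
      let rest := rowStep c ys prev.tail
      let opts := ((prev.headD []).map (fun t => c :: t)) ++ ((rest.headD []).map (fun t => d :: t))
      (if opts = [] then [[]] else opts) :: rest

def findInterleavings_alt (X : String) (Y : String) (interleavings : List String) (curr : String) : List String :=
  if X.toList = [] ∧ Y.toList = [] then
    PySem.Set.add (PySem.Set.ofList interleavings) curr
  else
    -- python's i loop from n down to 0 = foldr over X, threading the previous row
    let prev := X.toList.foldr (fun c p => rowStep c Y.toList p) (rowBase Y.toList)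
    (prev.headD []).foldl
      (fun s t => PySem.Set.add s (String.ofList (curr.toList ++ t)))
      (PySem.Set.ofList interleavings)

-- ===== PRECONDITION & SPEC =====
-- Pre_ excludes only X = "" ∧ Y = "", where Python A returns None (not a list) instead of the set.
def Pre_findInterleavings (X : String) (Y : String) (interleavings : List String) (curr : String) : Prop :=
  ¬ (X = "" ∧ Y = "")
instance (X : String) (Y : String) (interleavings : List String) (curr : String) : Decidable (Pre_findInterleavings X Y interleavings curr) := by unfold Pre_findInterleavings; infer_instance

def pvWitness_findInterleavings : String × String × List String × String := ("ab", "b", ["z"], "")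

def Spec_findInterleavings (X : String) (Y : String) (interleavings : List String) (curr : String) (out : List String) : Prop := out = findInterleavings_alt X Y interleavings curr
instance (X : String) (Y : String) (interleavings : List String) (curr : String) (out : List String) : Decidable (Spec_findInterleavings X Y interleavings curr out) := by unfold Spec_findInterleavings; infer_instance

-- ===== CLAIM (what is proved, stated in full; the proofs are below) =====
def Claim_equal_findInterleavings : Prop := ∀ (X : String) (Y : String) (interleavings : List String) (curr : String), Dom_findInterleavings X Y interleavings curr → Pre_findInterleavings X Y interleavings curr → Spec_findInterleavings X Y interleavings curr (findInterleavings X Y interleavings curr)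

-- ===== LEMMAS AND PROOFS =====

-- the common semantics: the list of interleavings of X and Y in A's DFS emission order
def weave : List Char → List Char → List (List Char)
  | [], [] => [[]]
  | [], d :: ys => (weave [] ys).map (fun t => d :: t)
  | c :: xs, [] => (weave xs []).map (fun t => c :: t)
  | c :: xs, d :: ys =>
      (weave xs (d :: ys)).map (fun t => c :: t) ++ (weave (c :: xs) ys).map (fun t => d :: t)
termination_by X Y => X.length + Y.length
decreasing_by all_goals simp

theorem weave_ne_nil (X Y : List Char) : weave X Y ≠ [] := by
  fun_induction weave X Y <;> simp_all

theorem goA_eq_foldl_weave (X Y : List Char) (s : PySem.Set String) (curr : List Char) :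
    goA X Y s curr
      = (weave X Y).foldl (fun s t => PySem.Set.add s (String.ofList (curr ++ t))) s := by
  fun_induction goA X Y s curr with
  | case1 s curr => simp [weave]
  | case2 d ys s curr ih => simp [weave, ih, List.foldl_map]
  | case3 c xs s curr ih => simp [weave, ih, List.foldl_map]
  | case4 c xs d ys s curr ih1 ih2 =>
      rw [ih1] at ih2
      simp only [weave, List.foldl_append, List.foldl_map]
      rw [ih1]
      simp only [List.append_assoc, List.singleton_append] at ih2 ⊢
      exact ih2

theorem headD_map_tails {α β : Type} (f : List α → β) (d : β) (l : List α) :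
    (l.tails.map f).headD d = f l := by
  cases l <;> simp

theorem rowBase_spec (Y : List Char) : rowBase Y = Y.tails.map (weave []) := by
  induction Y with
  | nil => simp [rowBase, weave]
  | cons d ys ih =>
      simp only [rowBase, ih, headD_map_tails]
      have h : (weave [] ys).map (fun t => d :: t) = weave [] (d :: ys) := by simp [weave]
      simp [h, weave_ne_nil]

theorem rowStep_spec (c : Char) (xs : List Char) (Y : List Char) :
    rowStep c Y (Y.tails.map (weave xs)) = Y.tails.map (weave (c :: xs)) := by
  induction Y with
  | nil =>
      simp only [rowStep, List.tails, List.map]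
      have h : (weave xs []).map (fun t => c :: t) = weave (c :: xs) [] := by simp [weave]
      simp [h, weave_ne_nil]
  | cons d ys ih =>
      simp only [rowStep, List.tails, List.map, List.tail_cons, List.headD_cons, ih,
        headD_map_tails]
      have h : (weave xs (d :: ys)).map (fun t => c :: t)
          ++ (weave (c :: xs) ys).map (fun t => d :: t) = weave (c :: xs) (d :: ys) := by
        simp [weave]
      simp [h, weave_ne_nil]

theorem foldr_rowStep_spec (X Y : List Char) :
    X.foldr (fun c p => rowStep c Y p) (rowBase Y) = Y.tails.map (weave X) := by
  induction X with
  | nil => exact rowBase_spec Y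
  | cons c xs ih => simp [List.foldr_cons, ih, rowStep_spec]

-- the master equality: the two ports agree on EVERY input
theorem ports_agree (X Y : String) (interleavings : List String) (curr : String) :
    findInterleavings X Y interleavings curr = findInterleavings_alt X Y interleavings curr := by
  unfold findInterleavings findInterleavings_alt
  rw [goA_eq_foldl_weave, foldr_rowStep_spec]
  by_cases h : X.toList = [] ∧ Y.toList = []
  · obtain ⟨hx, hy⟩ := h
    simp [hx, hy, weave, String.ofList_toList]
  · rw [if_neg h]
    simp only [headD_map_tails]

-- ===== VERDICT (by name: the statement is the Claim_ definition above) =====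
theorem findInterleavings_spec : Claim_equal_findInterleavings := by
  intro X Y interleavings curr _ _
  exact ports_agree X Y interleavings curr
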